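-- pv_equiv track=rewrite | github.com/zencompta/zen | backend/src/services/audit_analyzer.py | _generate_journal_recommendations
-- ===== SOURCE A (Python) =====
-- from typing import Dict, List, Any, Tuple
--
-- def _generate_journal_recommendations(anomalies: List[Dict]) -> List[str]:
--     """Génère des recommandations basées sur l'analyse des journaux"""
--     recommendations = []
--
--     high_amounts = [a for a in anomalies if a['type'] == 'high_amount_entry']
--     if high_amounts:
--         recommendations.append(
--             f"Examiner en détail {len(high_amounts)} écritures avec des montants élevés"
--         )
--
--     future_dates = [a for a in anomalies if a['type'] == 'future_date']
--     if future_dates: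
--         recommendations.append(
--             f"Corriger {len(future_dates)} écritures avec des dates futures"
--         )
--
--     if not recommendations:
--         recommendations.append("Les écritures de journal semblent cohérentes.")
--
--     return recommendations
-- ===== SOURCE B (Python) =====
-- from typing import Dict, List, Any, Tuple
--
-- RULES = [
--     ('high_amount_entry', 'Examiner en détail ', ' écritures avec des montants élevés'),
--     ('future_date', 'Corriger ', ' écritures avec des dates futures'),
-- ]
--
-- def _generate_journal_recommendations(anomalies: List[Dict]) -> List[str]:
--     """Table-driven rules engine: one pass maintains a counter vector parallel
--     to RULES, then the messages are generated from the table by one comprehension."""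
--     counts = [0] * len(RULES)
--     for a in anomalies:
--         t = a['type']
--         counts = [c + (t == ty) for (ty, _, _), c in zip(RULES, counts)]
--     recs = [pre + str(c) + suf for (ty, pre, suf), c in zip(RULES, counts) if c]
--     return recs if recs else ["Les écritures de journal semblent cohérentes."]
-- ===== Notes on version B (the rewrite author's own statement) =====
-- stated objective: alternative
-- what changed: Replaces A's hard-coded per-type filtering scans and if-chain with a table-driven rules engine: a RULES table, one pass maintaining a counter vector parallel to the table, and the recommendation list generated from the table by a single comprehension (the fallback stays).
import Mathlib
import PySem

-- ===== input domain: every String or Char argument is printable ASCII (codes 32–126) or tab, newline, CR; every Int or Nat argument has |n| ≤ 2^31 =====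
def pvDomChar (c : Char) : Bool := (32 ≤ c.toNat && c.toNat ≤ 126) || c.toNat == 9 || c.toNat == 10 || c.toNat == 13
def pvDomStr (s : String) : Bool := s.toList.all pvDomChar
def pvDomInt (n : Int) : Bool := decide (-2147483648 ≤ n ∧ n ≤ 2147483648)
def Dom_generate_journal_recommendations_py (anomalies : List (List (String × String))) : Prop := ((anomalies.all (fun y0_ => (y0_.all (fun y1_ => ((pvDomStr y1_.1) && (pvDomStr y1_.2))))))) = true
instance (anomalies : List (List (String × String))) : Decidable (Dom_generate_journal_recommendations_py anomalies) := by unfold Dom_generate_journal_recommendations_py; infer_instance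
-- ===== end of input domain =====

-- B replaces A's hard-coded filtering scans and if-chain with a table-driven rules engine
-- (one pass over the data maintaining a counter vector parallel to a rules table).

-- ===== PORT A =====
-- a['type'] under Pre_ always finds the key; ported as getD with a dummy default (outside Pre_ Python raises KeyError).
def generate_journal_recommendations_py (anomalies : List (List (String × String))) : List String :=
  let recommendations : List String := []
  let high_amounts := anomalies.filter (fun a => (PySem.Dict.mk a).getD "type" "" == "high_amount_entry")
  let recommendations := if high_amounts ≠ [] then
      recommendations ++ ["Examiner en détail " ++ PySem.Int.toStr (high_amounts.length : Int) ++ " écritures avec des montants élevés"]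
    else recommendations
  let future_dates := anomalies.filter (fun a => (PySem.Dict.mk a).getD "type" "" == "future_date")
  let recommendations := if future_dates ≠ [] then
      recommendations ++ ["Corriger " ++ PySem.Int.toStr (future_dates.length : Int) ++ " écritures avec des dates futures"]
    else recommendations
  if recommendations = [] then ["Les écritures de journal semblent cohérentes."] else recommendations

-- ===== PORT B =====
-- the RULES table of Source B: (anomaly type, message prefix, message suffix)
def pvRules : List (String × String × String) :=
  [("high_amount_entry", "Examiner en détail ", " écritures avec des montants élevés"),
   ("future_date", "Corriger ", " écritures avec des dates futures")]

def generate_journal_recommendations_py_alt (anomalies : List (List (String × String))) : List String :=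
  let counts : List Int := anomalies.foldl
    (fun counts a =>
      let t := (PySem.Dict.mk a).getD "type" ""
      (pvRules.zip counts).map (fun p => p.2 + (if t == p.1.1 then 1 else 0)))
    (pvRules.map (fun _ => (0 : Int)))
  let recs := ((pvRules.zip counts).filter (fun p => p.2 ≠ 0)).map
    (fun p => p.1.2.1 ++ PySem.Int.toStr p.2 ++ p.1.2.2)
  if recs ≠ [] then recs else ["Les écritures de journal semblent cohérentes."]

-- ===== PRECONDITION & SPEC =====
-- Pre_ excludes inputs where some anomaly dict lacks the 'type' key: there Python A (and B) raise KeyError.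
def Pre_generate_journal_recommendations_py (anomalies : List (List (String × String))) : Prop :=
  ∀ a ∈ anomalies, (PySem.Dict.mk a).contains "type" = true
instance (anomalies : List (List (String × String))) : Decidable (Pre_generate_journal_recommendations_py anomalies) := by unfold Pre_generate_journal_recommendations_py; infer_instance
def pvWitness_generate_journal_recommendations_py : (List (List (String × String))) :=
  [[("type", "high_amount_entry")], [("type", "x")]]
def Spec_generate_journal_recommendations_py (anomalies : List (List (String × String))) (out : List String) : Prop := out = generate_journal_recommendations_py_alt anomalies
instance (anomalies : List (List (String × String))) (out : List String) : Decidable (Spec_generate_journal_recommendations_py anomalies out) := by unfold Spec_generate_journal_recommendations_py; infer_instance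

-- ===== CLAIM (what is proved, stated in full; the proofs are below) =====
def Claim_equal_generate_journal_recommendations_py : Prop := ∀ (anomalies : List (List (String × String))), Dom_generate_journal_recommendations_py anomalies → Pre_generate_journal_recommendations_py anomalies → Spec_generate_journal_recommendations_py anomalies (generate_journal_recommendations_py anomalies)

-- ===== LEMMAS AND PROOFS =====

-- abbreviation used only in the proofs: length (as Int) of A's per-type filter
def pvCnt (v : String) (anomalies : List (List (String × String))) : Int :=
  ((anomalies.filter (fun a => (PySem.Dict.mk a).getD "type" "" == v)).length : Int)

theorem pvCnt_def (v : String) (l : List (List (String × String))) :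
    pvCnt v l = ((l.filter (fun a => (PySem.Dict.mk a).getD "type" "" == v)).length : Int) := rfl

theorem pvCnt_cons (v : String) (a : List (String × String)) (l : List (List (String × String))) :
    pvCnt v (a :: l) = (if (PySem.Dict.mk a).getD "type" "" == v then 1 else 0) + pvCnt v l := by
  unfold pvCnt
  by_cases h : (PySem.Dict.mk a).getD "type" "" == v
  · simp [h]; ring
  · simp [h]

-- B's counter vector, started at [h, f], ends at [h + #high, f + #future].
theorem counts_eval (l : List (List (String × String))) (h f : Int) :
    l.foldl
      (fun counts a =>
        let t := (PySem.Dict.mk a).getD "type" ""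
        (pvRules.zip counts).map (fun p => p.2 + (if t == p.1.1 then 1 else 0)))
      [h, f]
    = [h + pvCnt "high_amount_entry" l, f + pvCnt "future_date" l] := by
  induction l generalizing h f with
  | nil => simp [pvCnt]
  | cons a l ih =>
    simp only [List.foldl_cons]
    have hstep :
        (pvRules.zip [h, f]).map
          (fun p => p.2 + (if (PySem.Dict.mk a).getD "type" "" == p.1.1 then 1 else 0))
        = [h + (if (PySem.Dict.mk a).getD "type" "" == "high_amount_entry" then 1 else 0),
           f + (if (PySem.Dict.mk a).getD "type" "" == "future_date" then 1 else 0)] := by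
      simp [pvRules]
    rw [hstep, ih, pvCnt_cons, pvCnt_cons]
    ring_nf

-- ===== VERDICT (by name: the statement is the Claim_ definition above) =====
theorem generate_journal_recommendations_py_spec : Claim_equal_generate_journal_recommendations_py := by
  intro anomalies _ _
  unfold Spec_generate_journal_recommendations_py generate_journal_recommendations_py generate_journal_recommendations_py_alt
  have hinit : (pvRules.map (fun _ => (0 : Int))) = [0, 0] := by simp [pvRules]
  rw [hinit, counts_eval]
  have hne : ∀ (v : String),
      anomalies.filter (fun a => (PySem.Dict.mk a).getD "type" "" == v) ≠ []
      ↔ pvCnt v anomalies ≠ 0 := by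
    intro v
    unfold pvCnt
    constructor
    · intro h
      have : (anomalies.filter (fun a => (PySem.Dict.mk a).getD "type" "" == v)).length ≠ 0 :=
        fun hz => h (List.eq_nil_of_length_eq_zero hz)
      exact_mod_cast this
    · intro h hnil; simp [hnil] at h
  simp only [zero_add, ← pvCnt_def]
  simp only [hne]
  by_cases hH : pvCnt "high_amount_entry" anomalies = 0 <;>
    by_cases hF : pvCnt "future_date" anomalies = 0 <;>
      simp [pvRules, hH, hF]
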